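-- pv_equiv track=rewrite | github.com/cjolivier01/HockeyMOM | src/hmlib/analytics/ds_io.py | reorder_jerseys_with_frames
-- ===== SOURCE A (Python) =====
-- from typing import Any, Dict, List, Set, Tuple
--
-- def reorder_jerseys_with_frames(
--     jersey_numbers: List[int], frame_jersey_map: Dict[int, int]
-- ) -> Tuple[List[int], Dict[int, List[int]]]:
--     """
--     Reorders a list of jersey numbers based on the first occurrence of each jersey number by
--     increasing frame_id in the provided dictionary and returns a list of frames for each number.
--
--     Args:
--     jersey_numbers (List[int]): List of jersey numbers to reorder.
--     frame_jersey_map (Dict[int, int]): Dictionary with frame_id as keys and jersey_number as values.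
--
--     Returns:
--     Tuple[List[int], Dict[int, List[int]]]: A tuple containing the reordered list of jersey numbers
--                                            and a dictionary mapping each jersey number to a list of frames.
--     """
--     # Mapping from jersey numbers to their earliest frame_id
--     earliest_frames: Dict[int, int] = {}
--     # Mapping from jersey numbers to all their frame_ids
--     frames_per_jersey: Dict[int, List[int]] = {}
--
--     for frame_id, jersey_number in frame_jersey_map.items():
--         if jersey_number in earliest_frames:
--             earliest_frames[jersey_number] = min(earliest_frames[jersey_number], frame_id)
--         else:
--             earliest_frames[jersey_number] = frame_id
--
--         if jersey_number in frames_per_jersey: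
--             frames_per_jersey[jersey_number].append(frame_id)
--         else:
--             frames_per_jersey[jersey_number] = [frame_id]
--
--     # Sort the jersey numbers by the earliest frame_id
--     sorted_jerseys: List[Tuple[int, int]] = sorted(
--         ((jersey, frame) for jersey, frame in earliest_frames.items()), key=lambda x: x[1]
--     )
--
--     # Extract the sorted jersey numbers
--     sorted_jerseys_only: List[int] = [jersey for jersey, frame in sorted_jerseys]
--
--     # Filter the original jersey numbers to match the new order, maintaining the original frequency and order
--     jersey_order: Dict[int, int] = {jersey: idx for idx, jersey in enumerate(sorted_jerseys_only)}
--     final_sorted_jerseys: List[int] = sorted(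
--         (j for j in jersey_numbers if j in jersey_order), key=lambda x: jersey_order[x]
--     )
--
--     return final_sorted_jerseys, {
--         jersey: sorted(frames) for jersey, frames in frames_per_jersey.items()
--     }
-- ===== SOURCE B (Python) =====
-- def reorder_jerseys_with_frames(jersey_numbers, frame_jersey_map):
--     # Group frames per jersey in one pass; derive earliest frames afterwards;
--     # order jerseys by earliest frame; distribute jersey_numbers into buckets
--     # (stable) instead of sorting them.
--     frames_per_jersey = {}
--     for frame_id, jersey_number in frame_jersey_map.items():
--         frames_per_jersey.setdefault(jersey_number, []).append(frame_id)
--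
--     earliest = {j: min(fs) for j, fs in frames_per_jersey.items()}
--     order = sorted(earliest, key=lambda j: earliest[j])
--     jersey_order = {j: i for i, j in enumerate(order)}
--
--     buckets = [[] for _ in order]
--     for j in jersey_numbers:
--         if j in jersey_order:
--             buckets[jersey_order[j]].append(j)
--     final_sorted_jerseys = [j for b in buckets for j in b]
--
--     return final_sorted_jerseys, {j: sorted(fs) for j, fs in frames_per_jersey.items()}
-- ===== Notes on version B (the rewrite author's own statement) =====
-- stated objective: alternative
-- what changed: Frames are grouped per jersey in one setdefault pass and earliest frames derived by min afterwards (instead of two incrementally-maintained dicts), and the final sorted(jersey_numbers, key=rank) is replaced by a stable bucket-distribution pass over precomputed rank buckets.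
import Mathlib
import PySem

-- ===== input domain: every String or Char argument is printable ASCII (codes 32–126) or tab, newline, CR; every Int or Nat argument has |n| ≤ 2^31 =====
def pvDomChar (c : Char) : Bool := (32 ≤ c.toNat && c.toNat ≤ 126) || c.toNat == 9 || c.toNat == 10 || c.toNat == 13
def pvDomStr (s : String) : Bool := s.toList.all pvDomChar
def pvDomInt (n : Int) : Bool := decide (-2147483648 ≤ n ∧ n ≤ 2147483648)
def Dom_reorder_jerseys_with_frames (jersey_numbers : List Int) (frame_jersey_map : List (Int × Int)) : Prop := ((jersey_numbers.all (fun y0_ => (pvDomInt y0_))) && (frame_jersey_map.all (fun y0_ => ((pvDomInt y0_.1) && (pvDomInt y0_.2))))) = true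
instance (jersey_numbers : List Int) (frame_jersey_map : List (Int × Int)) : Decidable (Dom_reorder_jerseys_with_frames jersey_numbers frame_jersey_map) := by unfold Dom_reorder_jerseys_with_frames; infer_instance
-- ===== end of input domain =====

-- B groups frames per jersey in a single setdefault pass, derives earliest frames by min
-- afterwards, and replaces A's final sorted(..., key=rank) by a stable bucket-distribution
-- pass over precomputed rank buckets (objective: alternative decomposition, same behaviour).

-- ===== PORT A =====
-- loop body of A's `for frame_id, jersey_number in frame_jersey_map.items()`, earliest_frames part
def pvStepEarliest (e : PySem.Dict Int Int) (fj : Int × Int) : PySem.Dict Int Int :=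
  if e.contains fj.2 then e.insert fj.2 (min (e.getD fj.2 0) fj.1) else e.insert fj.2 fj.1

-- same loop body, frames_per_jersey part (the in-place .append is insert at the same key)
def pvStepFrames (f : PySem.Dict Int (List Int)) (fj : Int × Int) : PySem.Dict Int (List Int) :=
  if f.contains fj.2 then f.insert fj.2 (f.getD fj.2 [] ++ [fj.1]) else f.insert fj.2 [fj.1]

def reorder_jerseys_with_frames (jersey_numbers : List Int) (frame_jersey_map : List (Int × Int)) : List Int × (List (Int × List Int)) :=
  let st := frame_jersey_map.foldl
    (fun (st : PySem.Dict Int Int × PySem.Dict Int (List Int)) fj =>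
      (pvStepEarliest st.1 fj, pvStepFrames st.2 fj))
    (PySem.Dict.empty, PySem.Dict.empty)
  let sorted_jerseys := PySem.List.sorted st.1.items (fun x => x.2) false
  let sorted_jerseys_only := sorted_jerseys.map (fun p => p.1)
  let jersey_order := (PySem.List.enumerate sorted_jerseys_only 0).foldl
    (fun d p => d.insert p.2 p.1) PySem.Dict.empty
  let final_sorted_jerseys := PySem.List.sorted
    (jersey_numbers.filter (fun j => jersey_order.contains j))
    (fun x => jersey_order.getD x 0) false
  (final_sorted_jerseys, st.2.items.map (fun p => (p.1, PySem.List.sorted p.2 (fun x => x) false)))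

-- ===== PORT B =====
-- Source B: frames_per_jersey.setdefault(jersey_number, []).append(frame_id)
def pvGroupStep (f : PySem.Dict Int (List Int)) (fj : Int × Int) : PySem.Dict Int (List Int) :=
  f.modify fj.2 [] (fun l => l ++ [fj.1])

-- Source B: if j in jersey_order: buckets[jersey_order[j]].append(j)
def pvBucketStep (jersey_order : PySem.Dict Int Int) (bs : List (List Int)) (j : Int) : List (List Int) :=
  match jersey_order.get? j with
  | some i => bs.modify i.toNat (fun b => b ++ [j])
  | none => bs

def reorder_jerseys_with_frames_alt (jersey_numbers : List Int) (frame_jersey_map : List (Int × Int)) : List Int × (List (Int × List Int)) :=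
  let fpj := frame_jersey_map.foldl pvGroupStep PySem.Dict.empty
  -- {j: min(fs) ...}: every fs is nonempty, so Python's min never raises; `.getD 0` is unreachable
  let earliest := PySem.Dict.ofList (fpj.items.map (fun p => (p.1, (PySem.List.min? p.2 (fun x => x)).getD 0)))
  let order := PySem.List.sorted earliest.keys (fun j => earliest.getD j 0) false
  let jersey_order := PySem.Dict.ofList ((PySem.List.enumerate order 0).map (fun p => (p.2, p.1)))
  let buckets := jersey_numbers.foldl (pvBucketStep jersey_order) (order.map (fun _ => ([] : List Int)))
  (buckets.flatten, fpj.items.map (fun p => (p.1, PySem.List.sorted p.2 (fun x => x) false)))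

-- ===== PRECONDITION & SPEC =====
def Spec_reorder_jerseys_with_frames (jersey_numbers : List Int) (frame_jersey_map : List (Int × Int)) (out : List Int × (List (Int × List Int))) : Prop := out = reorder_jerseys_with_frames_alt jersey_numbers frame_jersey_map
instance (jersey_numbers : List Int) (frame_jersey_map : List (Int × Int)) (out : List Int × (List (Int × List Int))) : Decidable (Spec_reorder_jerseys_with_frames jersey_numbers frame_jersey_map out) := by unfold Spec_reorder_jerseys_with_frames; infer_instance

-- ===== CLAIM (what is proved, stated in full; the proofs are below) =====
def Claim_equal_reorder_jerseys_with_frames : Prop := ∀ (jersey_numbers : List Int) (frame_jersey_map : List (Int × Int)), Dom_reorder_jerseys_with_frames jersey_numbers frame_jersey_map → Spec_reorder_jerseys_with_frames jersey_numbers frame_jersey_map (reorder_jerseys_with_frames jersey_numbers frame_jersey_map)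

-- ===== LEMMAS AND PROOFS =====

-- Python's min(fs) of a nonempty list of ints (the `.getD 0` default is never used)
def pvLmin (fs : List Int) : Int := (PySem.List.min? fs (fun x => x)).getD 0

-- earliest_frames as the per-key min of frames_per_jersey
def pvEmap (f : PySem.Dict Int (List Int)) : PySem.Dict Int Int :=
  PySem.Dict.mk (f.items.map (fun p => (p.1, pvLmin p.2)))

-- ---- the paired fold of A splits into two independent folds ----
lemma pv_fold_pair (l : List (Int × Int)) (e : PySem.Dict Int Int) (f : PySem.Dict Int (List Int)) :
    l.foldl (fun (st : PySem.Dict Int Int × PySem.Dict Int (List Int)) fj =>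
      (pvStepEarliest st.1 fj, pvStepFrames st.2 fj)) (e, f)
    = (l.foldl pvStepEarliest e, l.foldl pvStepFrames f) := by
  induction l generalizing e f with
  | nil => rfl
  | cons p t ih => simpa using ih (pvStepEarliest e p) (pvStepFrames f p)

-- ---- B's grouping step is A's frames_per_jersey step ----
lemma pv_step_eq (f : PySem.Dict Int (List Int)) (p : Int × Int) : pvGroupStep f p = pvStepFrames f p := by
  unfold pvGroupStep pvStepFrames PySem.Dict.modify
  by_cases h : f.contains p.2
  · simp [h]
  · simp [h, PySem.Dict.getD_of_not_contains f [] (by simpa using h)]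

lemma pv_group_eq_frames (l : List (Int × Int)) (f : PySem.Dict Int (List Int)) :
    l.foldl pvGroupStep f = l.foldl pvStepFrames f := by
  induction l generalizing f with
  | nil => rfl
  | cons p t ih => simp [List.foldl_cons, pv_step_eq, ih]

lemma pv_frames_nodup (l : List (Int × Int)) (f : PySem.Dict Int (List Int)) (h : f.keys.Nodup) :
    (l.foldl pvStepFrames f).keys.Nodup := by
  induction l generalizing f with
  | nil => exact h
  | cons p t ih =>
      refine ih _ ?_
      unfold pvStepFrames
      split <;> exact PySem.Dict.nodup_keys_insert _ _ _ h

lemma pv_frames_nonempty (l : List (Int × Int)) (f : PySem.Dict Int (List Int))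
    (h : ∀ p ∈ f.items, p.2 ≠ []) : ∀ p ∈ (l.foldl pvStepFrames f).items, p.2 ≠ [] := by
  induction l generalizing f with
  | nil => exact h
  | cons p t ih =>
      refine ih _ ?_
      intro q hq
      unfold pvStepFrames at hq
      split at hq <;> rcases (PySem.Dict.mem_items_insert _ _ _ _).1 hq with h1 | h1 <;>
        first
          | (subst h1; simp)
          | exact h q h1.1

lemma pv_lmin_singleton (x : Int) : pvLmin [x] = x := by
  simp [pvLmin, PySem.List.min?]

lemma pv_lmin_append (l : List Int) (hl : l ≠ []) (x : Int) : pvLmin (l ++ [x]) = min (pvLmin l) x := by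
  rcases l with _ | ⟨h, t⟩
  · simp at hl
  · simp [pvLmin, PySem.List.min?_id_cons, List.foldl_append]

-- ---- pvEmap transports lookups ----
lemma pv_contains_emap (f : PySem.Dict Int (List Int)) (k : Int) :
    (pvEmap f).contains k = f.contains k := by
  simp [pvEmap, PySem.Dict.contains, List.any_map, Function.comp_def]

lemma pv_get?_emap (f : PySem.Dict Int (List Int)) (k : Int) :
    (pvEmap f).get? k = (f.get? k).map pvLmin := by
  simp only [pvEmap, PySem.Dict.get?, List.find?_map, Function.comp_def, Option.map_map]

-- ---- one step of A's earliest_frames loop is pvEmap of one step of the frames loop ----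
lemma pv_stepE_emap (f : PySem.Dict Int (List Int)) (fj : Int × Int)
    (hnd : f.keys.Nodup) (hne : ∀ p ∈ f.items, p.2 ≠ []) :
    pvStepEarliest (pvEmap f) fj = pvEmap (pvStepFrames f fj) := by
  obtain ⟨fid, j⟩ := fj
  unfold pvStepEarliest pvStepFrames
  simp only [pv_contains_emap]
  by_cases hc : f.contains j
  · -- key present
    obtain ⟨v, hv⟩ : ∃ v, f.get? j = some v := by
      rw [PySem.Dict.contains_eq_isSome_get?] at hc
      exact Option.isSome_iff_exists.mp hc
    have hvm : (j, v) ∈ f.items := PySem.Dict.mem_items_of_get?_eq_some f hv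
    have hvne : v ≠ [] := hne (j, v) hvm
    have hgd : f.getD j [] = v := PySem.Dict.getD_of_get?_eq_some f [] hv
    have hgde : (PySem.Dict.mk (f.items.map (fun p => (p.1, pvLmin p.2)))).getD j 0 = pvLmin v := by
      show (pvEmap f).getD j 0 = pvLmin v
      simp [PySem.Dict.getD, pv_get?_emap, hv]
    rw [if_pos hc, if_pos hc]
    apply PySem.Dict.ext
    rw [PySem.Dict.items_insert_of_contains _ _ (by rw [pv_contains_emap]; exact hc)]
    show _ = ((f.insert j (f.getD j [] ++ [fid])).items).map (fun p => (p.1, pvLmin p.2))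
    rw [PySem.Dict.items_insert_of_contains _ _ hc]
    simp only [pvEmap, List.map_map]
    apply List.map_congr_left
    intro p hp
    by_cases hpj : p.1 = j
    · have hp2 : p.2 = v := by
        have := PySem.Dict.get?_of_mem_items f (by simpa [← hpj] using hp) hnd
        rw [hpj] at this; rw [hv] at this; simpa using this.symm
      simp only [Function.comp_def, hpj, hp2, hgde, hgd, beq_self_eq_true, if_true]
      rw [pv_lmin_append v hvne fid]
    · simp [hpj]
  · rw [if_neg hc, if_neg hc]
    apply PySem.Dict.ext
    have h1 := PySem.Dict.items_insert_of_not_contains (pvEmap f) (k := j) fid (by rw [pv_contains_emap]; simpa using hc)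
    have h2 := PySem.Dict.items_insert_of_not_contains f (k := j) [fid] (by simpa using hc)
    rw [h1]
    show (pvEmap f).items ++ [(j, fid)] = ((f.insert j [fid]).items).map (fun p => (p.1, pvLmin p.2))
    rw [h2]
    simp [pvEmap, pv_lmin_singleton]

lemma pv_earliest_eq_emap (l : List (Int × Int)) (f : PySem.Dict Int (List Int))
    (hnd : f.keys.Nodup) (hne : ∀ p ∈ f.items, p.2 ≠ []) :
    l.foldl pvStepEarliest (pvEmap f) = pvEmap (l.foldl pvStepFrames f) := by
  induction l generalizing f with
  | nil => rfl
  | cons p t ih =>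
      simp only [List.foldl_cons]
      rw [pv_stepE_emap f p hnd hne]
      exact ih (pvStepFrames f p)
        (by simpa using pv_frames_nodup [p] f hnd)
        (by simpa using pv_frames_nonempty [p] f hne)

-- ---- Dict.ofList of a list with distinct keys is that literal association list ----
lemma pv_ofList_aux {ν : Type} : ∀ (l : List (Int × ν)) (d : PySem.Dict Int ν),
    (d.keys ++ l.map Prod.fst).Nodup → d.update l = PySem.Dict.mk (d.items ++ l) := by
  intro l
  induction l with
  | nil => intro d _; simp [PySem.Dict.update]
  | cons p t ih =>
      intro d hnd
      have hc : d.contains p.1 = false := by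
        rw [PySem.Dict.contains_eq_decide_mem_keys]
        have hd := List.disjoint_of_nodup_append hnd
        simp only [decide_eq_false_iff_not]
        intro hm
        exact hd hm (by simp)
      have h1 : d.update (p :: t) = (d.insert p.1 p.2).update t := rfl
      rw [h1, ih]
      · rw [PySem.Dict.items_insert_of_not_contains _ _ hc]
        simp
      · rw [PySem.Dict.keys_insert_of_not_contains _ _ hc]
        have h2 : d.keys ++ (p.1 :: t.map Prod.fst) = (d.keys ++ [p.1]) ++ t.map Prod.fst := by simp
        simp only [List.map_cons] at hnd
        rw [h2] at hnd
        exact hnd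

lemma pv_ofList_eq_mk {ν : Type} (l : List (Int × ν)) (h : (l.map Prod.fst).Nodup) :
    PySem.Dict.ofList l = PySem.Dict.mk l := by
  have := pv_ofList_aux l PySem.Dict.empty (by simpa [PySem.Dict.keys] using h)
  simpa [PySem.Dict.ofList] using this

-- ---- generic lemmas about PySem's stable insertion sort ----
lemma pv_insertBy_congr {α : Type} (b1 b2 : α → α → Bool) (x : α) (l : List α)
    (h : ∀ y ∈ l, b1 x y = b2 x y) :
    PySem.List.insertBy b1 x l = PySem.List.insertBy b2 x l := by
  induction l with
  | nil => rfl
  | cons y t ih =>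
      simp only [PySem.List.insertBy]
      rw [h y (by simp)]
      split
      · rfl
      · rw [ih (fun z hz => h z (by simp [hz]))]

lemma pv_foldl_insertBy_congr {α : Type} (k1 k2 : α → Int) (l : List α) :
    ∀ (acc : List α), (∀ a ∈ l, k1 a = k2 a) → (∀ a ∈ acc, k1 a = k2 a) →
    l.foldl (fun acc x => PySem.List.insertBy (fun a b => decide (k1 a < k1 b)) x acc) acc
      = l.foldl (fun acc x => PySem.List.insertBy (fun a b => decide (k2 a < k2 b)) x acc) acc := by
  induction l with
  | nil => intro acc _ _; rfl
  | cons y t ih =>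
      intro acc h hacc
      simp only [List.foldl_cons]
      rw [pv_insertBy_congr (fun a b => decide (k1 a < k1 b)) (fun a b => decide (k2 a < k2 b)) y acc
        (fun z hz => by simp only []; rw [h y (by simp), hacc z hz])]
      refine ih _ (fun a ha => h a (by simp [ha])) ?_
      intro w hw
      rcases (PySem.List.mem_insertBy _ _ _ _).1 hw with h1 | h1
      · subst h1; exact h _ (List.mem_cons_self ..)
      · exact hacc w h1

lemma pv_sorted_key_congr {α : Type} (l : List α) (k1 k2 : α → Int)
    (h : ∀ a ∈ l, k1 a = k2 a) :
    PySem.List.sorted l k1 false = PySem.List.sorted l k2 false := by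
  rw [PySem.List.sorted_eq_foldl_insertBy, PySem.List.sorted_eq_foldl_insertBy]
  exact pv_foldl_insertBy_congr k1 k2 l [] h (by simp)

lemma pv_insertBy_map {α β : Type} (f : α → β) (b : β → β → Bool) (x : α) (l : List α) :
    PySem.List.insertBy b (f x) (l.map f)
      = (PySem.List.insertBy (fun a c => b (f a) (f c)) x l).map f := by
  induction l with
  | nil => rfl
  | cons y t ih =>
      simp only [List.map_cons, PySem.List.insertBy]
      split <;> simp_all

lemma pv_sorted_map {α β : Type} (f : α → β) (key : β → Int) (l : List α) :
    PySem.List.sorted (l.map f) key false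
      = (PySem.List.sorted l (fun a => key (f a)) false).map f := by
  rw [PySem.List.sorted_eq_foldl_insertBy, PySem.List.sorted_eq_foldl_insertBy]
  induction l using List.reverseRecOn with
  | nil => rfl
  | append_singleton t x ih => simp [List.foldl_append, ih, pv_insertBy_map]

lemma pv_insertBy_append_not_before {α : Type} (b : α → α → Bool) (x : α) (l1 l2 : List α)
    (h : ∀ y ∈ l1, b x y = false) :
    PySem.List.insertBy b x (l1 ++ l2) = l1 ++ PySem.List.insertBy b x l2 := by
  induction l1 with
  | nil => rfl
  | cons y t ih =>
      simp only [List.cons_append, PySem.List.insertBy, h y (by simp)]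
      simp [ih (fun z hz => h z (by simp [hz]))]

lemma pv_insertBy_all_before {α : Type} (b : α → α → Bool) (x : α) (l : List α)
    (h : ∀ y ∈ l, b x y = true) :
    PySem.List.insertBy b x l = x :: l := by
  cases l with
  | nil => rfl
  | cons y t => simp [PySem.List.insertBy, h y (by simp)]

-- ---- the stable sort by first-occurrence rank is bucket concatenation ----
-- inserting x into the bucket concatenation puts it at the end of its own bucket
lemma pv_insertBy_flatten (os : List Int) (hnd : os.Nodup) (x : Int) (hx : x ∈ os)
    (bs : Int → List Int) (hb : ∀ o ∈ os, ∀ y ∈ bs o, y = o) :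
    PySem.List.insertBy (fun a b => decide ((os.idxOf a : Int) < (os.idxOf b : Int))) x
        (os.map bs).flatten
      = (os.map (fun o => if o = x then bs o ++ [x] else bs o)).flatten := by
  obtain ⟨pre, post, rfl⟩ := List.append_of_mem hx
  have hxpre : x ∉ pre := by
    intro hmem
    exact (List.disjoint_of_nodup_append hnd) hmem (by simp)
  have hidx : (pre ++ x :: post).idxOf x = pre.length := by
    rw [List.idxOf_append_of_notMem hxpre]
    simp [List.idxOf_cons_self]
  have hnd2 := hnd
  rw [List.nodup_append] at hnd2
  -- split the flatten
  rw [List.map_append, List.flatten_append]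
  rw [pv_insertBy_append_not_before]
  · rw [List.map_cons, List.flatten_cons]
    rw [pv_insertBy_append_not_before _ _ (bs x) _ ?hbx]
    case hbx =>
      intro y hy
      have hyx : y = x := hb x (by simp) y hy
      subst hyx
      simp
    rw [pv_insertBy_all_before _ _ _ ?hpost]
    case hpost =>
      intro y hy
      simp only [List.mem_flatten, List.mem_map] at hy
      obtain ⟨l, ⟨o, ho, rfl⟩, hyl⟩ := hy
      have hyo : y = o := hb o (by simp [ho]) y hyl
      subst hyo
      have hynpre : y ∉ pre := fun hm => hnd2.2.2 y hm y (by simp [ho]) rfl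
      have hynx : y ≠ x := by
        rintro rfl
        exact (List.nodup_cons.mp hnd2.2.1).1 ho
      have : (pre ++ x :: post).idxOf y = pre.length + (1 + post.idxOf y) := by
        rw [List.idxOf_append_of_notMem hynpre, List.idxOf_cons_ne _ (Ne.symm hynx)]
        omega
      simp only [decide_eq_true_eq]
      rw [hidx, this]
      push_cast
      omega
    -- both sides bucket-by-bucket
    rw [List.map_append, List.flatten_append, List.map_cons, List.flatten_cons]
    have hpre : (pre.map (fun o => if o = x then bs o ++ [x] else bs o)) = pre.map bs := by
      apply List.map_congr_left
      intro o ho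
      have : o ≠ x := fun h => hxpre (h ▸ ho)
      simp [this]
    have hpost : (post.map (fun o => if o = x then bs o ++ [x] else bs o)) = post.map bs := by
      apply List.map_congr_left
      intro o ho
      have : o ≠ x := by
        rintro rfl
        exact (List.nodup_cons.mp hnd2.2.1).1 ho
      simp [this]
    rw [hpre, hpost]
    simp
  · intro y hy
    simp only [List.mem_flatten, List.mem_map] at hy
    obtain ⟨l, ⟨o, ho, rfl⟩, hyl⟩ := hy
    have : y = o := hb o (by simp [ho]) y hyl
    subst this
    have : (pre ++ x :: post).idxOf y < pre.length := by
      rw [List.idxOf_append_of_mem ho]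
      exact List.idxOf_lt_length_of_mem ho
    simp only [decide_eq_false_iff_not, not_lt]
    rw [hidx]
    exact_mod_cast Int.ofNat_le.mpr (le_of_lt this)

lemma pv_sorted_buckets (os : List Int) (hnd : os.Nodup) (xs : List Int) :
    PySem.List.sorted (xs.filter (fun j => decide (j ∈ os))) (fun j => (os.idxOf j : Int)) false
      = (os.map (fun o => xs.filter (fun x => x == o))).flatten := by
  induction xs using List.reverseRecOn with
  | nil =>
      simp [PySem.List.sorted]
  | append_singleton t x ih =>
      by_cases hx : x ∈ os
      · rw [List.filter_append, PySem.List.sorted_eq_foldl_insertBy, List.foldl_append]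
        rw [← PySem.List.sorted_eq_foldl_insertBy]
        have hfx : List.filter (fun j => decide (j ∈ os)) [x] = [x] := by simp [hx]
        rw [hfx]
        have hins : List.foldl (fun acc y => PySem.List.insertBy
              (fun a b => decide ((os.idxOf a : Int) < (os.idxOf b : Int))) y acc)
            (PySem.List.sorted (t.filter (fun j => decide (j ∈ os))) (fun j => (os.idxOf j : Int)) false) [x]
            = PySem.List.insertBy (fun a b => decide ((os.idxOf a : Int) < (os.idxOf b : Int))) x
              (PySem.List.sorted (t.filter (fun j => decide (j ∈ os))) (fun j => (os.idxOf j : Int)) false) := by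
          simp
        rw [hins, ih]
        rw [pv_insertBy_flatten os hnd x hx (fun o => t.filter (fun y => y == o))
          (fun o _ y hy => by simpa using (List.mem_filter.mp hy).2)]
        apply congrArg
        apply List.map_congr_left
        intro o ho
        by_cases hox : o = x
        · subst hox
          simp [List.filter_append]
        · have : (x == o) = false := beq_eq_false_iff_ne.mpr (Ne.symm hox)
          simp [List.filter_append, hox, this]
      · have h1 : (t ++ [x]).filter (fun j => decide (j ∈ os)) = t.filter (fun j => decide (j ∈ os)) := by
          simp [List.filter_append, hx]
        rw [h1, ih]
        apply congrArg
        apply List.map_congr_left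
        intro o ho
        have : (x == o) = false := beq_eq_false_iff_ne.mpr (fun h => hx (h ▸ ho))
        simp [List.filter_append, this]

lemma pv_modify_map (os : List Int) (g : Int → List Int) (hf : List Int → List Int) :
    ∀ (j : Int), os.Nodup → j ∈ os →
    (os.map g).modify (os.idxOf j) hf = os.map (fun o => if o = j then hf (g o) else g o) := by
  induction os with
  | nil => intro j _ hj; simp at hj
  | cons o t ih =>
      intro j hnd hj
      by_cases hoj : o = j
      · subst hoj
        rw [List.idxOf_cons_self]
        simp only [List.map_cons, List.modify_zero_cons]
        refine congrArg₂ _ (by simp) ?_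
        symm
        apply List.map_congr_left
        intro a ha
        have haj : a ≠ o := fun hq => (List.nodup_cons.mp hnd).1 (hq ▸ ha)
        simp [haj]
      · rw [List.idxOf_cons_ne _ hoj]
        simp only [List.map_cons, List.modify_succ_cons]
        rw [ih j (List.nodup_cons.mp hnd).2 (by
          rcases List.mem_cons.mp hj with hq | hq
          · exact absurd hq.symm hoj
          · exact hq)]
        simp [hoj]

lemma pv_bucket_fold (os : List Int) (hnd : os.Nodup) (jo : PySem.Dict Int Int)
    (hjo : ∀ j, jo.get? j = if j ∈ os then some (os.idxOf j : Int) else none) :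
    ∀ (xs p : List Int),
    xs.foldl (pvBucketStep jo) (os.map (fun o => p.filter (fun x => x == o)))
      = os.map (fun o => (p ++ xs).filter (fun x => x == o)) := by
  intro xs
  induction xs with
  | nil => intro p; simp
  | cons j t ih =>
      intro p
      rw [List.foldl_cons]
      have hstep : pvBucketStep jo (os.map (fun o => p.filter (fun x => x == o))) j
          = os.map (fun o => (p ++ [j]).filter (fun x => x == o)) := by
        unfold pvBucketStep
        rw [hjo j]
        by_cases hj : j ∈ os
        · rw [if_pos hj]
          show (os.map (fun o => p.filter (fun x => x == o))).modify ((os.idxOf j : Int)).toNat _ = _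
          rw [Int.toNat_natCast]
          rw [pv_modify_map os _ _ j hnd hj]
          apply List.map_congr_left
          intro o ho
          by_cases hoj : o = j
          · subst hoj; simp [List.filter_append]
          · have : (j == o) = false := beq_eq_false_iff_ne.mpr (Ne.symm hoj)
            simp [List.filter_append, hoj, this]
        · rw [if_neg hj]
          apply List.map_congr_left
          intro o ho
          have : (j == o) = false := beq_eq_false_iff_ne.mpr (fun h => hj (h ▸ ho))
          simp [List.filter_append, this]
      rw [hstep]
      have := ih (p ++ [j])
      simpa using this

-- ---- jersey_order lookups ----
lemma pv_enum_find? (os : List Int) : ∀ (s j : Int),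
    List.find? (fun p => p.1 == j) ((PySem.List.enumerate os s).map (fun p => (p.2, p.1)))
      = if j ∈ os then some (j, s + (os.idxOf j : Int)) else none := by
  induction os with
  | nil => intro s j; simp [PySem.List.enumerate]
  | cons o t ih =>
      intro s j
      rw [PySem.List.enumerate_cons]
      by_cases h : o = j
      · subst h
        simp [List.idxOf_cons_self]
      · have hbeq : ((o:Int) == j) = false := beq_eq_false_iff_ne.mpr h
        simp only [List.map_cons, List.find?_cons, hbeq]
        rw [ih (s+1) j]
        by_cases hm : j ∈ t
        · rw [if_pos hm, if_pos (by simp [hm])]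
          rw [List.idxOf_cons_ne _ h]
          congr 1
          push_cast
          ring_nf
        · rw [if_neg hm, if_neg (by simp [hm, Ne.symm h])]


lemma pv_keys_emap (f : PySem.Dict Int (List Int)) : (pvEmap f).keys = f.keys := by
  simp [pvEmap, PySem.Dict.keys, List.map_map, Function.comp_def]

lemma pv_jo_get? (os : List Int) (j : Int) :
    (PySem.Dict.mk ((PySem.List.enumerate os 0).map (fun p => (p.2, p.1)))).get? j
      = if j ∈ os then some (os.idxOf j : Int) else none := by
  show Option.map _ _ = _
  rw [pv_enum_find? os 0 j]
  by_cases h : j ∈ os <;> simp [h]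

lemma pv_main (jn : List Int) (fm : List (Int × Int)) :
    reorder_jerseys_with_frames jn fm = reorder_jerseys_with_frames_alt jn fm := by
  simp only [reorder_jerseys_with_frames, reorder_jerseys_with_frames_alt]
  -- the grouping dicts agree
  rw [pv_group_eq_frames fm PySem.Dict.empty]
  set F := fm.foldl pvStepFrames PySem.Dict.empty with hFdef
  have hFnd : F.keys.Nodup := pv_frames_nodup fm PySem.Dict.empty (by simp [PySem.Dict.empty, PySem.Dict.keys])
  have hFne : ∀ p ∈ F.items, p.2 ≠ [] := pv_frames_nonempty fm PySem.Dict.empty (by simp [PySem.Dict.empty])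
  -- A's paired fold
  rw [pv_fold_pair fm PySem.Dict.empty PySem.Dict.empty]
  have hE : fm.foldl pvStepEarliest PySem.Dict.empty = pvEmap F := by
    have h0 : (PySem.Dict.empty : PySem.Dict Int Int) = pvEmap PySem.Dict.empty := rfl
    rw [h0, pv_earliest_eq_emap fm PySem.Dict.empty (by simp [PySem.Dict.empty, PySem.Dict.keys]) (by simp [PySem.Dict.empty])]
  rw [hE]
  set E := pvEmap F with hEdef
  have hEnd : E.keys.Nodup := by rw [hEdef, pv_keys_emap]; exact hFnd
  -- B's earliest dict is E
  have hEB : PySem.Dict.ofList (F.items.map (fun p => (p.1, (PySem.List.min? p.2 (fun x => x)).getD 0))) = E := by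
    rw [pv_ofList_eq_mk _ (by
      simpa [List.map_map, Function.comp_def] using (show (F.items.map Prod.fst).Nodup from hFnd))]
    rfl
  rw [hEB]
  -- B's order list is A's sorted_jerseys_only
  set os := (PySem.List.sorted E.items (fun x => x.2) false).map (fun p => p.1) with hosdef
  have horder : PySem.List.sorted E.keys (fun j => E.getD j 0) false = os := by
    have hk : E.keys = E.items.map (fun p => p.1) := rfl
    rw [hk, pv_sorted_map (fun p => p.1) (fun j => E.getD j 0) E.items]
    rw [pv_sorted_key_congr E.items _ (fun x => x.2)
      (fun p hp => PySem.Dict.getD_of_mem_items E (k := p.1) (v := p.2) (by simpa using hp) hEnd 0)]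
  rw [horder]
  have hosnd : os.Nodup := by
    have hperm : os.Perm (E.items.map (fun p => p.1)) :=
      (PySem.List.sorted_perm E.items (fun x => x.2) false).map (fun p => p.1)
    exact hperm.nodup_iff.mpr hEnd
  -- the two jersey_order dicts agree
  have hjoA : (PySem.List.enumerate os 0).foldl (fun d p => d.insert p.2 p.1) PySem.Dict.empty
      = PySem.Dict.mk ((PySem.List.enumerate os 0).map (fun p => (p.2, p.1))) := by
    apply PySem.Dict.ext
    rw [PySem.Dict.items_foldl_insert_fresh (PySem.List.enumerate os 0) (fun p => p.2) (fun p => p.1)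
      PySem.Dict.empty (by intro a _; simp [PySem.Dict.contains_empty])
      (by rw [PySem.List.map_snd_enumerate]; exact hosnd)]
    simp [PySem.Dict.empty]
  have hjoB : PySem.Dict.ofList ((PySem.List.enumerate os 0).map (fun p => (p.2, p.1)))
      = PySem.Dict.mk ((PySem.List.enumerate os 0).map (fun p => (p.2, p.1))) :=
    pv_ofList_eq_mk _ (by
      simpa [List.map_map, Function.comp_def, PySem.List.map_snd_enumerate] using hosnd)
  rw [hjoA, hjoB]
  set jo := PySem.Dict.mk ((PySem.List.enumerate os 0).map (fun p => (p.2, p.1))) with hjodef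
  have hget : ∀ j, jo.get? j = if j ∈ os then some (os.idxOf j : Int) else none :=
    fun j => pv_jo_get? os j
  have hcont : ∀ j, jo.contains j = decide (j ∈ os) := by
    intro j
    rw [PySem.Dict.contains_eq_isSome_get?, hget j]
    by_cases h : j ∈ os <;> simp [h]
  -- first components agree
  refine Prod.ext ?_ rfl
  show PySem.List.sorted (jn.filter (fun j => jo.contains j)) (fun x => jo.getD x 0) false
      = (jn.foldl (pvBucketStep jo) (os.map (fun _ => ([] : List Int)))).flatten
  have hfil : jn.filter (fun j => jo.contains j) = jn.filter (fun j => decide (j ∈ os)) :=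
    List.filter_congr (fun a _ => hcont a)
  rw [hfil]
  rw [pv_sorted_key_congr _ (fun x => jo.getD x 0) (fun j => (os.idxOf j : Int)) (by
    intro a ha
    have hmem : a ∈ os := by simpa using (List.mem_filter.mp ha).2
    simp only [PySem.Dict.getD, hget a, if_pos hmem]
    rfl)]
  rw [pv_sorted_buckets os hosnd jn]
  have hinit : os.map (fun _ => ([] : List Int)) = os.map (fun o => ([] : List Int).filter (fun x => x == o)) := by
    simp
  rw [hinit, pv_bucket_fold os hosnd jo hget jn []]
  simp

-- ===== VERDICT (by name: the statement is the Claim_ definition above) =====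
theorem reorder_jerseys_with_frames_spec : Claim_equal_reorder_jerseys_with_frames := by
  intro jn fm _
  exact pv_main jn fm
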